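-- pv_equiv track=rewrite | github.com/andy0013/tp2guarna | precondiciones.py | obtiene_lista_palabras
-- ===== SOURCE A (Python) =====
-- def obtiene_lista_palabras(oraciones):
--     """Obtiene una lista de palabras del texto suministrado por la catedra. Realizada por Leandro"""
--     listaf = []
--     t = ""
--     parametro = "<>;0123456789!?/\[]{}().,:\-\"\'"
--     for oracion in oraciones :
--         for c in oracion:
--             if not c in parametro:
--                 t += c.upper()
--     listaf = t.split(" ")
--     return sorted(listaf)
-- ===== SOURCE B (Python) =====
-- def obtiene_lista_palabras(oraciones):
--     """One pass: accumulate words directly instead of building a big string and splitting it."""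
--     parametro = "<>;0123456789!?/\[]{}().,:\-\"\'"
--     palabras = []
--     actual = ""
--     for oracion in oraciones:
--         for c in oracion:
--             if c in parametro:
--                 continue
--             if c == ' ':
--                 palabras.append(actual)
--                 actual = ""
--             else:
--                 actual += c.upper()
--     palabras.append(actual)
--     return sorted(palabras)
-- ===== Notes on version B (the rewrite author's own statement) =====
-- stated objective: alternative
-- what changed: B fuses filtering, uppercasing and splitting into one pass that appends completed words to the result as it meets spaces, instead of A's build-one-big-string-then-split(' ') two-phase approach.
import Mathlib
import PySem

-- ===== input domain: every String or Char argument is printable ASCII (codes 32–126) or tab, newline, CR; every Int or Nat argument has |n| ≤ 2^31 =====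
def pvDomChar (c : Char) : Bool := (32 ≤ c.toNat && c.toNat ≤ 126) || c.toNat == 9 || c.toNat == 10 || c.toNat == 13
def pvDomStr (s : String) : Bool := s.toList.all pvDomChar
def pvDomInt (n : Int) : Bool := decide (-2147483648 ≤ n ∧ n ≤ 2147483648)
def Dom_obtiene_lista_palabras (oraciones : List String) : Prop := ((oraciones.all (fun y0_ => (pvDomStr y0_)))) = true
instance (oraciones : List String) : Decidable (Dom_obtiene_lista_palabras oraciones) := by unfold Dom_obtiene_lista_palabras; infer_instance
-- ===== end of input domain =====

-- B fuses filter+uppercase+split into one pass that accumulates words directly,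
-- instead of A's build-one-big-string-then-split(" ") two-phase approach (objective: alternative).


-- ===== PORT A =====
-- the Python literal "<>;0123456789!?/\[]{}().,:\-\"\'" (backslashes kept where Python keeps them)
def pvParametro : List Char := "<>;0123456789!?/\\[]{}().,:\\-\"'".toList

-- 'if not c in parametro: t += c.upper()' — c is a single character, so Python's
-- substring test 'c in parametro' is exactly character membership (List.contains)
def pvStepA (t : List Char) (c : Char) : List Char :=
  if !(pvParametro.contains c) then t ++ [PySem.Chars.upperChar c] else t

def obtiene_lista_palabras (oraciones : List String) : List String :=
  let t : List Char :=
    oraciones.foldl (fun t oracion => oracion.toList.foldl pvStepA t) []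
  let listaf := (PySem.Chars.splitOn t [' ']).map (fun w => String.mk w)
  PySem.List.sorted listaf (fun x => x) false

-- ===== PORT B =====
-- state = (palabras, actual); actual kept as List Char (Python str built char by char)
def pvStepB (st : List String × List Char) (c : Char) : List String × List Char :=
  if pvParametro.contains c then st
  else if c = ' ' then (st.1 ++ [String.mk st.2], [])
  else (st.1, st.2 ++ [PySem.Chars.upperChar c])

def obtiene_lista_palabras_alt (oraciones : List String) : List String :=
  let st : List String × List Char :=
    oraciones.foldl (fun st oracion => oracion.toList.foldl pvStepB st) ([], [])
  PySem.List.sorted (st.1 ++ [String.mk st.2]) (fun x => x) false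

-- ===== PRECONDITION & SPEC =====
def Spec_obtiene_lista_palabras (oraciones : List String) (out : List String) : Prop := out = obtiene_lista_palabras_alt oraciones
instance (oraciones : List String) (out : List String) : Decidable (Spec_obtiene_lista_palabras oraciones out) := by unfold Spec_obtiene_lista_palabras; infer_instance

-- ===== CLAIM (what is proved, stated in full; the proofs are below) =====
def Claim_equal_obtiene_lista_palabras : Prop := ∀ (oraciones : List String), Dom_obtiene_lista_palabras oraciones → Spec_obtiene_lista_palabras oraciones (obtiene_lista_palabras oraciones)

-- ===== LEMMAS AND PROOFS =====

-- the filtered-and-uppercased character stream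
def pvFilt : List Char → List Char
  | [] => []
  | c :: r => if pvParametro.contains c then pvFilt r else PySem.Chars.upperChar c :: pvFilt r

-- split-on-single-space, cons-form
def pvWords : List Char → List (List Char)
  | [] => [[]]
  | c :: r =>
    if c = ' ' then [] :: pvWords r
    else match pvWords r with
      | [] => [[c]]   -- unreachable: pvWords is never []
      | h :: t => (c :: h) :: t

lemma pvWords_ne_nil (l : List Char) : pvWords l ≠ [] := by
  cases l with
  | nil => simp [pvWords]
  | cons c r =>
    simp only [pvWords]
    split <;> [simp; split <;> simp]

lemma pvWords_cons_exists (l : List Char) : ∃ h t, pvWords l = h :: t := by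
  cases hr : pvWords l with
  | nil => exact absurd hr (pvWords_ne_nil l)
  | cons a b => exact ⟨a, b, rfl⟩

lemma pvFilt_cons_mem {c : Char} (r : List Char) (h : pvParametro.contains c = true) :
    pvFilt (c :: r) = pvFilt r := by
  simp only [pvFilt]; rw [if_pos h]

lemma pvFilt_cons_not_mem {c : Char} (r : List Char) (h : ¬ pvParametro.contains c = true) :
    pvFilt (c :: r) = PySem.Chars.upperChar c :: pvFilt r := by
  simp only [pvFilt]; rw [if_neg h]

lemma stepA_mem {c : Char} (t : List Char) (h : pvParametro.contains c = true) :
    pvStepA t c = t := by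
  simp only [List.contains_eq_mem, decide_eq_true_eq] at h
  simp [pvStepA, h]

lemma stepA_not_mem {c : Char} (t : List Char) (h : ¬ pvParametro.contains c = true) :
    pvStepA t c = t ++ [PySem.Chars.upperChar c] := by
  simp only [List.contains_eq_mem, decide_eq_true_eq] at h
  simp [pvStepA, h]

lemma stepB_mem {c : Char} (st : List String × List Char) (h : pvParametro.contains c = true) :
    pvStepB st c = st := by
  simp only [pvStepB]; rw [if_pos h]

lemma stepB_space (st : List String × List Char) :
    pvStepB st ' ' = (st.1 ++ [String.mk st.2], []) := by
  simp only [pvStepB]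
  rw [if_neg (by decide)]
  simp

lemma stepB_char {c : Char} (st : List String × List Char)
    (h : ¬ pvParametro.contains c = true) (hs : c ≠ ' ') :
    pvStepB st c = (st.1, st.2 ++ [PySem.Chars.upperChar c]) := by
  simp only [pvStepB]; rw [if_neg h, if_neg hs]

lemma pvToNat_ofNat (n : Nat) (h : n < 55296) : (Char.ofNat n).toNat = n := by
  have hv : n.isValidChar := Or.inl h
  simp [Char.ofNat, hv, Char.ofNatAux, Char.toNat]

lemma pvUpper_ne_space (c : Char) (h : c ≠ ' ') : PySem.Chars.upperChar c ≠ ' ' := by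
  unfold PySem.Chars.upperChar PySem.Chars.islower
  split
  · rename_i hl
    simp only [Bool.and_eq_true, decide_eq_true_eq] at hl
    have h1 : 97 ≤ c.toNat := (UInt32.le_iff_toNat_le).mp (Char.le_def.mp hl.1)
    have h2 : c.toNat ≤ 122 := (UInt32.le_iff_toNat_le).mp (Char.le_def.mp hl.2)
    intro he
    have ht : (Char.ofNat (c.toNat - 32)).toNat = c.toNat - 32 := pvToNat_ofNat _ (by omega)
    rw [he] at ht
    have h32 : (' ' : Char).toNat = 32 := rfl
    omega
  · exact h

-- A's inner loop appends the filtered stream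
lemma stepA_fold (cs : List Char) : ∀ t, cs.foldl pvStepA t = t ++ pvFilt cs := by
  induction cs with
  | nil => intro t; simp [pvFilt]
  | cons c r ih =>
    intro t
    by_cases h : pvParametro.contains c = true
    · rw [List.foldl_cons, stepA_mem t h, ih, pvFilt_cons_mem r h]
    · rw [List.foldl_cons, stepA_not_mem t h, ih, pvFilt_cons_not_mem r h]
      simp

-- the fuel-based splitOn.go computes pvWords
lemma splitOn_go_spec : ∀ (fuel : Nat) (l cur : List Char) (acc : List (List Char)),
    l.length ≤ fuel →
    PySem.Chars.splitOn.go [' '] fuel l cur acc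
      = acc.reverse ++ (pvWords l).modifyHead (fun w => cur.reverse ++ w) := by
  intro fuel
  induction fuel with
  | zero =>
    intro l cur acc h
    have : l = [] := by cases l <;> simp_all
    subst this
    simp [PySem.Chars.splitOn.go, pvWords]
  | succ n ih =>
    intro l cur acc h
    cases l with
    | nil => simp [PySem.Chars.splitOn.go, pvWords]
    | cons c rest =>
      by_cases hc : c = ' '
      · subst hc
        have hgo : PySem.Chars.splitOn.go [' '] (n+1) (' ' :: rest) cur acc
            = PySem.Chars.splitOn.go [' '] n rest [] (cur.reverse :: acc) := by
          simp [PySem.Chars.splitOn.go, List.isPrefixOf]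
        rw [hgo, ih rest [] (cur.reverse :: acc) (by simpa using h)]
        simp only [pvWords, if_pos rfl, List.modifyHead, List.reverse_cons, List.reverse_nil,
          List.nil_append, List.append_assoc]
        obtain ⟨hh, tt, he⟩ := pvWords_cons_exists rest
        simp [he]
      · have hgo : PySem.Chars.splitOn.go [' '] (n+1) (c :: rest) cur acc
            = PySem.Chars.splitOn.go [' '] n rest (c :: cur) acc := by
          simp [PySem.Chars.splitOn.go, List.isPrefixOf, Ne.symm hc]
        rw [hgo, ih rest (c :: cur) acc (by simpa using h)]
        simp only [pvWords, if_neg hc]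
        obtain ⟨hh, tt, he⟩ := pvWords_cons_exists rest
        simp [he]

lemma splitOn_space (l : List Char) : PySem.Chars.splitOn l [' '] = pvWords l := by
  have hs := splitOn_go_spec (l.length + 1) l [] [] (by omega)
  simp only [List.reverse_nil, List.nil_append] at hs
  rw [PySem.Chars.splitOn, hs]
  obtain ⟨hh, tt, he⟩ := pvWords_cons_exists l
  simp [he]

-- B's loop invariant: flushing the final buffer yields the words of the filtered stream
lemma stepB_fold (cs : List Char) : ∀ (res : List String) (buf : List Char),
    (cs.foldl pvStepB (res, buf)).1 ++ [String.mk (cs.foldl pvStepB (res, buf)).2]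
      = res ++ ((pvWords (pvFilt cs)).modifyHead (fun w => buf ++ w)).map (fun w => String.mk w) := by
  induction cs with
  | nil => intro res buf; simp [pvFilt, pvWords]
  | cons c r ih =>
    intro res buf
    by_cases hp : pvParametro.contains c = true
    · rw [List.foldl_cons, stepB_mem _ hp, ih res buf, pvFilt_cons_mem r hp]
    · by_cases hs : c = ' '
      · subst hs
        rw [List.foldl_cons, stepB_space, ih (res ++ [String.mk buf]) [],
          pvFilt_cons_not_mem r hp]
        have hup : PySem.Chars.upperChar ' ' = ' ' := by decide
        rw [hup]
        simp only [pvWords, if_pos rfl, List.modifyHead, List.map_cons, List.append_assoc,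
          List.append_nil, List.nil_append, List.cons_append, List.singleton_append]
        obtain ⟨hh, tt, he⟩ := pvWords_cons_exists (pvFilt r)
        simp [he]
      · rw [List.foldl_cons, stepB_char _ hp hs, ih res (buf ++ [PySem.Chars.upperChar c]),
          pvFilt_cons_not_mem r hp]
        simp only [pvWords, if_neg (pvUpper_ne_space c hs)]
        obtain ⟨hh, tt, he⟩ := pvWords_cons_exists (pvFilt r)
        simp [he]

lemma pvModifyHead_id (l : List (List Char)) : l.modifyHead (fun w => w) = l := by
  cases l <;> simp

-- ===== VERDICT (by name: the statement is the Claim_ definition above) =====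
theorem obtiene_lista_palabras_spec : Claim_equal_obtiene_lista_palabras := by
  intro oraciones _
  unfold Spec_obtiene_lista_palabras obtiene_lista_palabras obtiene_lista_palabras_alt
  simp only [List.foldl_flatMap.symm]
  rw [stepA_fold, stepB_fold, splitOn_space]
  simp [pvModifyHead_id]
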